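-- pv_equiv track=rewrite | github.com/prsuman1/olist-customer-satisfaction-predictor | src/visualization/report_generator.py | _format_feature_categories
-- ===== SOURCE A (Python) =====
-- def _format_feature_categories(descriptions: dict) -> str:
--     """Format features by category."""
--     categories = {
--         'Order Complexity': ['bulk', 'size', 'multi', 'diversity'],
--         'Price Features': ['price', 'freight', 'installment', 'payment'],
--         'Logistics': ['weight', 'volume', 'dimension'],
--         'Geographic': ['state', 'location', 'distance'],
--         'Temporal': ['season', 'weekend', 'business', 'holiday'],
--         'Risk Indicators': ['risk', 'complexity', 'violation']
--     }
--
--     html_items = []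
--     for category, keywords in categories.items():
--         matching_features = [
--             f for f in descriptions.keys()
--             if any(keyword in f.lower() for keyword in keywords)
--         ]
--         if matching_features:
--             html_items.append(f"""
--             <div class="feature-item">
--                 <strong>{category}</strong><br>
--                 <small>{len(matching_features)} features</small>
--             </div>
--             """)
--
--     return "\n".join(html_items)
-- ===== SOURCE B (Python) =====
-- def _format_feature_categories(descriptions: dict) -> str:
--     """Format features by category (single pass over the features)."""
--     categories = {
--         'Order Complexity': ['bulk', 'size', 'multi', 'diversity'],
--         'Price Features': ['price', 'freight', 'installment', 'payment'],
--         'Logistics': ['weight', 'volume', 'dimension'],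
--         'Geographic': ['state', 'location', 'distance'],
--         'Temporal': ['season', 'weekend', 'business', 'holiday'],
--         'Risk Indicators': ['risk', 'complexity', 'violation']
--     }
--
--     counts = {category: 0 for category in categories}
--     for f in descriptions.keys():
--         fl = f.lower()
--         for category, keywords in categories.items():
--             if any(keyword in fl for keyword in keywords):
--                 counts[category] += 1
--
--     html_items = []
--     for category in categories:
--         if counts[category]:
--             html_items.append(f"""
--             <div class="feature-item">
--                 <strong>{category}</strong><br>
--                 <small>{counts[category]} features</small>
--             </div>
--             """)
--
--     return "\n".join(html_items)
-- ===== Notes on version B (the rewrite author's own statement) =====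
-- stated objective: alternative
-- what changed: B inverts the loop nest: one pass over the features maintains a per-category counts dict (each feature lowered once), and the HTML list is then built from the counts, instead of A's six passes that each re-filter (and re-lower) the whole feature list.
import Mathlib
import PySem

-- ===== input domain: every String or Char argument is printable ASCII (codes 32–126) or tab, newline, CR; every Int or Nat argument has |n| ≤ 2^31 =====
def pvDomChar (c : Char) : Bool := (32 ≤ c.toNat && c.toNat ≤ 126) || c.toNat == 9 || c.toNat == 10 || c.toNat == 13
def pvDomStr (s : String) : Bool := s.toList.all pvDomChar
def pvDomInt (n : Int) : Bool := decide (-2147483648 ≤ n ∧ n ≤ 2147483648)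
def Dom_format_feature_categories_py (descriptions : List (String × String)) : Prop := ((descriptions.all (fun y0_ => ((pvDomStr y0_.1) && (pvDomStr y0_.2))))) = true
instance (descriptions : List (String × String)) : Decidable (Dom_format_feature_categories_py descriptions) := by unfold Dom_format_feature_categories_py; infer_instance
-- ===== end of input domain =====

-- ===== PORT A =====
-- B inverts A's loop nest (one pass over the features with a counts dict, instead of
-- six filter passes); same category table and HTML template in both.

-- the shared literal category table (the same dict literal appears in both Pythons)
def pvCats : List (String × List String) :=
  [("Order Complexity", ["bulk", "size", "multi", "diversity"]),
   ("Price Features", ["price", "freight", "installment", "payment"]),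
   ("Logistics", ["weight", "volume", "dimension"]),
   ("Geographic", ["state", "location", "distance"]),
   ("Temporal", ["season", "weekend", "business", "holiday"]),
   ("Risk Indicators", ["risk", "complexity", "violation"])]

-- any(keyword in fl for keyword in keywords)
def pvKwMatch (keywords : List String) (fl : String) : Bool :=
  keywords.any (fun kw => PySem.Str.isIn kw fl)

-- the f-string body appended for one category
def pvItemHtml (category : String) (n : Int) : String :=
  "\n            <div class=\"feature-item\">\n                <strong>" ++ category ++
  "</strong><br>\n                <small>" ++ PySem.Int.toStr n ++
  " features</small>\n            </div>\n            "

def format_feature_categories_py (descriptions : List (String × String)) : String :=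
  let categories := pvCats
  let html_items := categories.foldl (fun html_items p =>
    let matching_features := (PySem.Dict.mk descriptions).keys.filter
      (fun f => pvKwMatch p.2 (PySem.Str.lower f))
    if matching_features = [] then html_items
    else html_items ++ [pvItemHtml p.1 (Int.ofNat matching_features.length)]) []
  PySem.Str.join "\n" html_items

-- ===== PORT B =====
def format_feature_categories_py_alt (descriptions : List (String × String)) : String :=
  let categories := pvCats
  let counts0 := categories.foldl (fun d p => d.insert p.1 (0 : Int)) PySem.Dict.empty
  let counts := (PySem.Dict.mk descriptions).keys.foldl (fun d f =>
    let fl := PySem.Str.lower f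
    categories.foldl (fun d p =>
      if pvKwMatch p.2 fl then d.modify p.1 0 (· + 1) else d) d) counts0
  let html_items := categories.foldl (fun html_items p =>
    if counts.getD p.1 0 = 0 then html_items
    else html_items ++ [pvItemHtml p.1 (counts.getD p.1 0)]) []
  PySem.Str.join "\n" html_items

-- ===== PRECONDITION & SPEC =====
def Spec_format_feature_categories_py (descriptions : List (String × String)) (out : String) : Prop := out = format_feature_categories_py_alt descriptions
instance (descriptions : List (String × String)) (out : String) : Decidable (Spec_format_feature_categories_py descriptions out) := by unfold Spec_format_feature_categories_py; infer_instance

-- ===== CLAIM (what is proved, stated in full; the proofs are below) =====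
def Claim_equal_format_feature_categories_py : Prop := ∀ (descriptions : List (String × String)), Dom_format_feature_categories_py descriptions → Spec_format_feature_categories_py descriptions (format_feature_categories_py descriptions)

-- ===== LEMMAS AND PROOFS =====

-- inner category loop leaves categories it does not name untouched
theorem pv_inner_preserve (cs : List (String × List String)) (fl : String)
    (d : PySem.Dict String Int) (c : String) (hc : c ∉ cs.map Prod.fst) :
    (cs.foldl (fun d p => if pvKwMatch p.2 fl then d.modify p.1 0 (· + 1) else d) d).getD c 0
      = d.getD c 0 := by
  induction cs generalizing d with
  | nil => rfl
  | cons q cs ih =>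
    simp only [List.map_cons, List.mem_cons, not_or] at hc
    simp only [List.foldl_cons]
    rw [ih _ hc.2]
    split
    · exact PySem.Dict.getD_modify_of_ne _ _ _ hc.1
    · rfl

-- one step of the outer loop adds 1 exactly to the matching categories
theorem pv_inner_step (cs : List (String × List String)) (fl : String)
    (d : PySem.Dict String Int) (c : String) (kws : List String)
    (hmem : (c, kws) ∈ cs) (hnd : (cs.map Prod.fst).Nodup) :
    (cs.foldl (fun d p => if pvKwMatch p.2 fl then d.modify p.1 0 (· + 1) else d) d).getD c 0
      = d.getD c 0 + (if pvKwMatch kws fl then 1 else 0) := by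
  induction cs generalizing d with
  | nil => cases hmem
  | cons q cs ih =>
    obtain ⟨qc, qkws⟩ := q
    simp only [List.map_cons, List.nodup_cons] at hnd
    simp only [List.foldl_cons]
    rcases List.mem_cons.mp hmem with h | h
    · rw [Prod.mk.injEq] at h
      obtain ⟨rfl, rfl⟩ := h
      rw [pv_inner_preserve _ _ _ _ hnd.1]
      split
      · rw [PySem.Dict.getD_modify_self]
      · omega
    · have hne : c ≠ qc := by
        intro e
        exact hnd.1 (e ▸ List.mem_map_of_mem (f := Prod.fst) h)
      rw [ih _ h hnd.2]
      congr 1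
      split
      · exact PySem.Dict.getD_modify_of_ne _ _ _ hne
      · rfl

-- the counts dict counts the matching features
theorem pv_counts (ks : List String) (d : PySem.Dict String Int) (c : String)
    (kws : List String) (hmem : (c, kws) ∈ pvCats) :
    (ks.foldl (fun d f =>
        pvCats.foldl (fun d p =>
          if pvKwMatch p.2 (PySem.Str.lower f) then d.modify p.1 0 (· + 1) else d) d) d).getD c 0
      = d.getD c 0 + Int.ofNat (ks.countP (fun f => pvKwMatch kws (PySem.Str.lower f))) := by
  induction ks generalizing d with
  | nil => simp
  | cons f ks ih =>
    have hnd : ((pvCats).map Prod.fst).Nodup := by decide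
    simp only [List.foldl_cons]
    rw [ih, pv_inner_step _ _ _ _ _ hmem hnd, List.countP_cons]
    split <;> simp <;> omega

theorem pv_counts0_zero (c : String) (kws : List String) (hmem : (c, kws) ∈ pvCats) :
    (pvCats.foldl (fun d p => d.insert p.1 (0 : Int)) PySem.Dict.empty).getD c 0 = 0 := by
  fin_cases hmem <;> decide

-- ===== VERDICT (by name: the statement is the Claim_ definition above) =====
theorem format_feature_categories_py_spec : Claim_equal_format_feature_categories_py := by
  intro ds _
  unfold Spec_format_feature_categories_py format_feature_categories_py format_feature_categories_py_alt
  simp only []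
  congr 1
  apply PySem.List.foldl_congr_mem
  intro acc p hp
  have hc := pv_counts (PySem.Dict.mk ds).keys
      (pvCats.foldl (fun d p => d.insert p.1 (0 : Int)) PySem.Dict.empty) p.1 p.2 hp
  rw [pv_counts0_zero p.1 p.2 hp, zero_add] at hc
  rw [hc, List.countP_eq_length_filter]
  have hlen : ((PySem.Dict.mk ds).keys.filter (fun f => pvKwMatch p.2 (PySem.Str.lower f)) = [])
      ↔ ((PySem.Dict.mk ds).keys.filter (fun f => pvKwMatch p.2 (PySem.Str.lower f))).length = 0 :=
    List.length_eq_zero_iff.symm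
  by_cases h : (PySem.Dict.mk ds).keys.filter (fun f => pvKwMatch p.2 (PySem.Str.lower f)) = []
  · rw [if_pos h, if_pos]
    rw [h]
    rfl
  · rw [if_neg h, if_neg]
    intro e
    apply h
    apply hlen.mpr
    rw [Int.ofNat_eq_natCast] at e
    omega
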